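-- pv_equiv track=rewrite | github.com/Pintized/CS449-Spring-Project | peg_game.py | _build_english_board
-- ===== SOURCE A (Python) =====
-- def _build_english_board(n):
--     board = [[1 for _ in range(n)] for _ in range(n)]
--     arm = n // 2 - 1
--     for r in range(n):
--         for c in range(n):
--             if (r < arm and c < arm) or \
--                (r < arm and c >= n - arm) or \
--                (r >= n - arm and c < arm) or \
--                (r >= n - arm and c >= n - arm):
--                 board[r][c] = -1
--     board[n // 2][n // 2] = 0
--     return board
-- ===== SOURCE B (Python) =====
-- def _build_english_board(n):
--     # Build only the top-left quadrant's decisions; obtain the right half of each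
--     # row and the bottom half of the board by mirror reflection (the cross is
--     # symmetric under both reflections), then place the centre hole.
--     arm = n // 2 - 1
--     half = (n + 1) // 2
--     top = []
--     for r in range(half):
--         left = [-1 if (r < arm and c < arm) else 1 for c in range(half)]
--         top.append(left + left[:n - half][::-1])
--     board = top + [list(row) for row in top[:n - half]][::-1]
--     board[n // 2][n // 2] = 0
--     return board
-- ===== Notes on version B (the rewrite author's own statement) =====
-- stated objective: alternative
-- what changed: B computes only the top-left quadrant's cell decisions and produces the right half of each row and the bottom half of the board by reversed-slice mirroring (the cross is symmetric under both reflections), instead of testing the four-clause corner condition at every one of the n^2 cells.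
import Mathlib
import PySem

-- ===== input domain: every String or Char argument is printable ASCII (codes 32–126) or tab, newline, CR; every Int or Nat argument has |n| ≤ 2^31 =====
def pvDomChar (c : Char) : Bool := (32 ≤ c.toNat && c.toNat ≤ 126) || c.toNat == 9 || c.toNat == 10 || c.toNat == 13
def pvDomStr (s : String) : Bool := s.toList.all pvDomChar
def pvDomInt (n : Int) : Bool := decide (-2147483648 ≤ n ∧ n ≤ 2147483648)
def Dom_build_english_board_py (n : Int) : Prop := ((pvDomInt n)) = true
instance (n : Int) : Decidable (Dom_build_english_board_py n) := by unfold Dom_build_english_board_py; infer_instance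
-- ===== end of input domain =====

-- B builds only the top-left quadrant's cell decisions and obtains the right half of each row and
-- the bottom half of the board by reversed-slice mirroring, instead of testing the corner condition
-- at every cell; same asymptotic cost (alternative decomposition).

-- ===== PORT A =====
def build_english_board_py (n : Int) : List (List Int) :=
  let board := (PySem.List.pyRange 0 n).map (fun _r => (PySem.List.pyRange 0 n).map (fun _c => (1:Int)))
  let arm := PySem.Int.floordiv n 2 - 1
  let board := (PySem.List.pyRange 0 n).foldl (fun b r =>
      (PySem.List.pyRange 0 n).foldl (fun b c =>
        if (r < arm ∧ c < arm) ∨ (r < arm ∧ c ≥ n - arm) ∨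
           (r ≥ n - arm ∧ c < arm) ∨ (r ≥ n - arm ∧ c ≥ n - arm)
        -- board[r][c] = -1 : r, c come from range(n), so they are nonnegative and in range; .toNat is exact
        then b.modify r.toNat (fun row => row.set c.toNat (-1)) else b) b) board
  -- board[n//2][n//2] = 0 : the index n//2 is nonnegative and in range under Pre_ (1 ≤ n), so .toNat is exact
  board.modify (PySem.Int.floordiv n 2).toNat (fun row => row.set (PySem.Int.floordiv n 2).toNat 0)

-- ===== PORT B =====
def build_english_board_py_alt (n : Int) : List (List Int) :=
  let arm := PySem.Int.floordiv n 2 - 1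
  let half := PySem.Int.floordiv (n + 1) 2
  let top := (PySem.List.pyRange 0 half).map (fun r =>
      let left := (PySem.List.pyRange 0 half).map (fun c => if r < arm ∧ c < arm then (-1:Int) else 1)
      -- left + left[:n - half][::-1]
      left ++ (PySem.List.slice left none (some (n - half))).reverse)
  -- board = top + [list(row) for row in top[:n - half]][::-1]
  let board := top ++ ((PySem.List.slice top none (some (n - half))).map (fun row => row)).reverse
  -- board[n//2][n//2] = 0 : in range under Pre_ (1 ≤ n), so .toNat is exact
  board.modify (PySem.Int.floordiv n 2).toNat (fun row => row.set (PySem.Int.floordiv n 2).toNat 0)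

-- ===== PRECONDITION & SPEC =====
-- Pre_ excludes n ≤ 0, where the final centre write board[n//2][n//2] hits the empty board and A raises IndexError.
def Pre_build_english_board_py (n : Int) : Prop := 1 ≤ n
instance (n : Int) : Decidable (Pre_build_english_board_py n) := by unfold Pre_build_english_board_py; infer_instance
def pvWitness_build_english_board_py : Int := 7

def Spec_build_english_board_py (n : Int) (out : List (List Int)) : Prop := out = build_english_board_py_alt n
instance (n : Int) (out : List (List Int)) : Decidable (Spec_build_english_board_py n out) := by unfold Spec_build_english_board_py; infer_instance

-- ===== CLAIM (what is proved, stated in full; the proofs are below) =====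
def Claim_equal_build_english_board_py : Prop := ∀ (n : Int), Dom_build_english_board_py n → Pre_build_english_board_py n → Spec_build_english_board_py n (build_english_board_py n)

-- ===== LEMMAS AND PROOFS =====

-- the common description both ports are proved equal to
def pvArm (N : Nat) : Int := ((N / 2 : Nat) : Int) - 1
abbrev pvEdge (N k : Nat) : Prop := (k : Int) < pvArm N ∨ (N : Int) - pvArm N ≤ (k : Int)
def pvRow (N r : Nat) : List Int := (List.range N).map (fun c => if pvEdge N r ∧ pvEdge N c then -1 else 1)
def pvSpecBoard (N : Nat) : List (List Int) :=
  ((List.range N).map (pvRow N)).modify (N / 2) (fun row => row.set (N / 2) 0)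

theorem modify_identity {α : Type} (b : List α) (k : Nat) :
    b.modify k (fun x => x) = b := by
  apply List.ext_getElem?
  intro i
  simp only [List.getElem?_modify]
  by_cases h : k = i <;> cases b[i]? <;> simp [h]

theorem modify_ite {α : Type} (P : Prop) [Decidable P] (b : List α) (k : Nat) (f : α → α) :
    (if P then b.modify k f else b) = b.modify k (fun x => if P then f x else x) := by
  split
  · rfl
  · exact (modify_identity b k).symm

theorem modify_fuse {α : Type} (b : List α) (k : Nat) (f g : α → α) :
    (b.modify k f).modify k g = b.modify k (fun x => g (f x)) := by
  apply List.ext_getElem?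
  intro i
  simp only [List.getElem?_modify]
  by_cases h : k = i <;> cases b[i]? <;> simp [h]

theorem foldl_modify_hoist {α β : Type} (cs : List β) (k : Nat) (h : β → α → α) :
    ∀ (b : List α), cs.foldl (fun b c => b.modify k (h c)) b
      = b.modify k (fun row => cs.foldl (fun row c => h c row) row) := by
  induction cs with
  | nil => intro b; simp [modify_identity]
  | cons c cs ih => intro b; simp only [List.foldl_cons, ih, modify_fuse]

theorem foldl_range_modify {α : Type} (f : Nat → α → α) :
    ∀ (M : Nat) (init : List α), (List.range M).foldl (fun b k => b.modify k (f k)) init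
      = init.mapIdx (fun k x => if k < M then f k x else x) := by
  intro M
  induction M with
  | zero =>
    intro init
    apply List.ext_getElem?
    intro i
    simp only [List.range_zero, List.foldl_nil, List.getElem?_mapIdx]
    cases init[i]? <;> simp
  | succ M ih =>
    intro init
    rw [List.range_succ, List.foldl_append, ih]
    apply List.ext_getElem?
    intro i
    simp [List.getElem?_modify, List.getElem?_mapIdx]
    rcases l : init[i]? with _ | x
    · simp
    · simp [Option.map_some]
      split_ifs <;> simp_all <;> omega

theorem mapIdx_map_range {α β : Type} (N : Nat) (g : Nat → α) (f : Nat → α → β) :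
    ((List.range N).map g).mapIdx (fun k x => f k x) = (List.range N).map (fun k => f k (g k)) := by
  apply List.ext_getElem?
  intro i
  simp [List.getElem?_mapIdx]
  by_cases h : i < N <;> simp [h]

theorem set_eq_modify_const {α : Type} (b : List α) (k : Nat) (v : α) :
    b.set k v = b.modify k (fun _ => v) := by
  apply List.ext_getElem?
  intro i
  simp only [List.getElem?_set, List.getElem?_modify]
  by_cases h : k = i <;> cases hl : b[i]? <;>
    simp_all [List.getElem?_eq_some_iff] <;> exact hl.1

-- half a symmetric sequence plus its mirrored prefix is the whole sequence
theorem mirror_list {α : Type} (N H : Nat) (hle : H ≤ N) (hge : N ≤ 2 * H)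
    (f g : Nat → α)
    (hagree : ∀ c, c < H → f c = g c)
    (hsym : ∀ c, H ≤ c → c < N → g c = f (N - 1 - c)) :
    (List.range H).map f ++ (((List.range H).map f).take (N - H)).reverse
      = (List.range N).map g := by
  apply List.ext_getElem?
  intro i
  by_cases hi : i < H
  · rw [List.getElem?_append_left (by simp; omega), List.getElem?_map, List.getElem?_map,
      List.getElem?_range hi, List.getElem?_range (show i < N by omega),
      Option.map_some, Option.map_some, hagree i hi]
  · by_cases hiN : i < N
    · rw [List.getElem?_append_right (by simp; omega)]
      have h2 : i - ((List.range H).map f).length = i - H := by simp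
      rw [h2, List.getElem?_reverse (by simp; omega)]
      have h3 : (((List.range H).map f).take (N - H)).length - 1 - (i - H) = N - 1 - i := by
        simp; omega
      rw [h3, List.getElem?_take_of_lt (by omega), List.getElem?_map, List.getElem?_map,
        List.getElem?_range (by omega), List.getElem?_range hiN,
        Option.map_some, Option.map_some, hsym i (by omega) hiN]
    · rw [List.getElem?_eq_none (by simp; omega), List.getElem?_eq_none (by simp; omega)]

theorem A_eq_spec (N : Nat) (h1 : 1 ≤ N) :
    build_english_board_py (N : Int) = pvSpecBoard N := by
  unfold build_english_board_py pvSpecBoard pvRow pvEdge pvArm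
  have hfd : PySem.Int.floordiv (N : Int) 2 = ((N / 2 : Nat) : Int) := by
    rw [PySem.Int.floordiv_eq_ediv_of_pos (by norm_num)]; omega
  simp only [PySem.List.pyRange_zero_natCast, List.foldl_map, List.map_map, Function.comp,
    Int.toNat_natCast, set_eq_modify_const, modify_ite,
    foldl_modify_hoist, foldl_range_modify, mapIdx_map_range, hfd]
  apply List.ext_getElem?
  intro i
  simp only [List.getElem?_modify, List.getElem?_map]
  by_cases hi : i < N
  · simp only [List.getElem?_range hi, Option.map_eq_map, Option.map_some, hi, if_true]
    have hmod : ∀ (L R : List Int), L = R →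
        L.modify (N / 2) (fun _ => (0:Int)) = R.modify (N / 2) (fun _ => 0) :=
      fun _ _ h => by rw [h]
    have hrow : ∀ (P Q : Nat → Int), (∀ j, j < N → P j = Q j) →
        (List.range N).map P = (List.range N).map Q := by
      intro P Q h
      apply List.map_congr_left
      intro j hj
      exact h j (List.mem_range.mp hj)
    split_ifs with hiM
    · rw [Option.some_inj]
      apply hmod
      apply hrow
      intro j hj
      split_ifs <;> first | rfl | omega
    · rw [Option.some_inj]
      apply hrow
      intro j hj
      split_ifs <;> first | rfl | omega
  · simp [List.getElem?_range, hi]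

theorem B_eq_spec (N : Nat) (h1 : 1 ≤ N) :
    build_english_board_py_alt (N : Int) = pvSpecBoard N := by
  unfold build_english_board_py_alt pvSpecBoard
  have hfd : PySem.Int.floordiv (N : Int) 2 = ((N / 2 : Nat) : Int) := by
    rw [PySem.Int.floordiv_eq_ediv_of_pos (by norm_num)]; omega
  have hH : PySem.Int.floordiv ((N : Int) + 1) 2 = (((N + 1) / 2 : Nat) : Int) := by
    rw [PySem.Int.floordiv_eq_ediv_of_pos (by norm_num)]; omega
  set H : Nat := (N + 1) / 2 with hHdef
  have hsl : (N : Int) - (H : Int) = ((N - H : Nat) : Int) := by omega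
  simp only [hfd, hH, hsl, Int.toNat_natCast, PySem.List.pyRange_zero_natCast, List.map_map,
    Function.comp_def, PySem.List.slice_to_natCast, List.map_id', set_eq_modify_const]
  congr 1
  refine mirror_list N H (by omega) (by omega) _ _ ?_ ?_
  · intro r hr
    unfold pvRow
    beta_reduce
    refine mirror_list N H (by omega) (by omega) _ _ ?_ ?_
    · intro c hc
      beta_reduce
      unfold pvEdge pvArm
      split_ifs <;> first | rfl | omega
    · intro c hc hcN
      beta_reduce
      unfold pvEdge pvArm
      split_ifs <;> first | rfl | omega
  · intro r hr hrN
    unfold pvRow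
    beta_reduce
    have hm := mirror_list N H (by omega) (by omega)
        (fun c : Nat => if ((N - 1 - r : Nat) : Int) < ((N / 2 : Nat) : Int) - 1 ∧
            ((c : Nat) : Int) < ((N / 2 : Nat) : Int) - 1 then (-1 : Int) else 1)
        (fun c => if pvEdge N (N - 1 - r) ∧ pvEdge N c then (-1 : Int) else 1)
        (fun c hc => by beta_reduce; unfold pvEdge pvArm; split_ifs <;> first | rfl | omega)
        (fun c hc hcN => by beta_reduce; unfold pvEdge pvArm; split_ifs <;> first | rfl | omega)
    rw [hm]
    apply List.map_congr_left
    intro c _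
    unfold pvEdge pvArm
    split_ifs <;> first | rfl | omega

-- ===== VERDICT (by name: the statement is the Claim_ definition above) =====
theorem build_english_board_py_spec : Claim_equal_build_english_board_py := by
  intro n _ hpre
  have h1 : 1 ≤ n := hpre
  unfold Spec_build_english_board_py
  obtain ⟨N, rfl⟩ : ∃ N : Nat, n = (N : Int) := ⟨n.toNat, by omega⟩
  rw [A_eq_spec N (by omega), B_eq_spec N (by omega)]
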